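-- pv_equiv track=rewrite | github.com/rgb91/LeetCode | practice_2320.py | countHousePlacements
-- ===== SOURCE A (Python) =====
-- def countHousePlacements(n: int) -> int:
--     """
--
--     """
--     if n==1: return 4
--     if n==2: return 9
--
--     preprev, prev = 2, 3
--     current = 0
--     for i in range(n-2):
--         current = preprev + prev
--         preprev, prev = prev, current
--
--     return (current*current)%(10**9+7)
-- ===== SOURCE B (Python) =====
-- MOD = 10**9 + 7
--
--
-- def _fib_pair(k):
--     """Return (F(k), F(k+1)) mod MOD by fast doubling."""
--     if k == 0:
--         return (0, 1)
--     a, b = _fib_pair(k >> 1)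
--     c = a * (2 * b - a) % MOD
--     d = (a * a + b * b) % MOD
--     if k & 1:
--         return (d, (c + d) % MOD)
--     return (c, d)
--
--
-- def countHousePlacements(n: int) -> int:
--     if n < 1:
--         raise ValueError("n must be a positive number of plots")
--     f = _fib_pair(n + 2)[0]
--     return f * f % MOD
-- ===== Notes on version B (the rewrite author's own statement) =====
-- stated objective: faster
-- what changed: Replaces A's linear Fibonacci loop by recursive fast doubling with modular reduction at every step, computing the squared Fibonacci answer in logarithmically many multiplications on mod-sized numbers.
-- outside the precondition, e.g. on countHousePlacements(0): A returns 0, B raises ValueError; on countHousePlacements(-3): A returns 0, B raises ValueError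
import Mathlib
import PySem

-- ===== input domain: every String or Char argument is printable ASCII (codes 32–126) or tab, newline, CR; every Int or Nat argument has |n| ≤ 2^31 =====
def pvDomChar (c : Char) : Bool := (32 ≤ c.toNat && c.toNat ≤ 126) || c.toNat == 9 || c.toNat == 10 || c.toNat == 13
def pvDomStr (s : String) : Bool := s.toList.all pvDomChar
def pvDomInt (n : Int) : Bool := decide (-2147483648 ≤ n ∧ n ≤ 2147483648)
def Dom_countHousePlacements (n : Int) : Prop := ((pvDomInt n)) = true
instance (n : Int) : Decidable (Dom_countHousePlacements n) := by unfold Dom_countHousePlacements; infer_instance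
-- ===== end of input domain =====

-- B replaces A's O(n) Fibonacci loop by fast-doubling modular Fibonacci (fewer, mod-sized steps).

-- ===== PORT A =====
-- state = (preprev, prev, current); Python's '%' is PySem.Int.mod (exact).
def countHousePlacements (n : Int) : Int :=
  if n = 1 then 4
  else if n = 2 then 9
  else
    let st := (PySem.List.pyRange 0 (n - 2) 1).foldl
      (fun (s : Int × Int × Int) _ => (s.2.1, s.1 + s.2.1, s.1 + s.2.1)) (2, 3, 0)
    PySem.Int.mod (st.2.2 * st.2.2) (10 ^ 9 + 7)

-- ===== PORT B =====
def pvMOD : Int := 10 ^ 9 + 7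

-- _fib_pair: returns (F(k), F(k+1)) mod pvMOD by fast doubling; Python's k >> 1 on a
-- nonnegative int is k / 2 on Nat (exact), 'k & 1' tests k % 2 = 1.
def fibPair : Nat → Int × Int
  | 0 => (0, 1)
  | (k + 1) =>
    let p := fibPair ((k + 1) / 2)
    let a := p.1
    let b := p.2
    let c := PySem.Int.mod (a * (2 * b - a)) pvMOD
    let d := PySem.Int.mod (a * a + b * b) pvMOD
    if (k + 1) % 2 = 1 then (d, PySem.Int.mod (c + d) pvMOD) else (c, d)
decreasing_by exact Nat.div_lt_self (Nat.succ_pos k) one_lt_two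

def countHousePlacements_alt (n : Int) : Int :=
  if n < 1 then 0   -- Python B raises ValueError here (outside Pre_)
  else
    let f := (fibPair (n + 2).toNat).1
    PySem.Int.mod (f * f) pvMOD

-- ===== PRECONDITION & SPEC =====
-- Pre_ excludes n ≤ 0, outside the problem's domain (n counts street plots): there A's 0 is
-- leftover loop state and B raises ValueError.
def Pre_countHousePlacements (n : Int) : Prop := 1 ≤ n
instance (n : Int) : Decidable (Pre_countHousePlacements n) := by unfold Pre_countHousePlacements; infer_instance

def pvWitness_countHousePlacements : Int := 5

def Spec_countHousePlacements (n : Int) (out : Int) : Prop := out = countHousePlacements_alt n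
instance (n : Int) (out : Int) : Decidable (Spec_countHousePlacements n out) := by unfold Spec_countHousePlacements; infer_instance

-- ===== CLAIM (what is proved, stated in full; the proofs are below) =====
def Claim_equal_countHousePlacements : Prop := ∀ (n : Int), Dom_countHousePlacements n → Pre_countHousePlacements n → Spec_countHousePlacements n (countHousePlacements n)

-- ===== LEMMAS AND PROOFS =====

-- folding a step that ignores the list elements is function iteration
theorem foldl_const_step {α β : Type} (g : α → α) (l : List β) (init : α) :
    l.foldl (fun s _ => g s) init = g^[l.length] init := by
  induction l generalizing init with
  | nil => rfl
  | cons x xs ih => simp [List.foldl, ih, Function.iterate_succ_apply]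

-- A's loop state after m+1 iterations
theorem iter_step (m : Nat) :
    (fun (s : Int × Int × Int) => (s.2.1, s.1 + s.2.1, s.1 + s.2.1))^[m + 1] (2, 3, 0)
      = ((Nat.fib (m + 4) : Int), (Nat.fib (m + 5) : Int), (Nat.fib (m + 5) : Int)) := by
  induction m with
  | zero => norm_num [Nat.fib]
  | succ k ih =>
    rw [Function.iterate_succ_apply', ih]
    have e1 : k + 1 + 4 = k + 5 := by omega
    have e2 : k + 1 + 5 = k + 6 := by omega
    have h : Nat.fib (k + 6) = Nat.fib (k + 4) + Nat.fib (k + 5) := by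
      rw [show k + 6 = (k + 4) + 2 by ring, Nat.fib_add_two]
    rw [e1, e2, h]
    simp only [Prod.mk.injEq]
    refine ⟨trivial, by push_cast; ring, by push_cast; ring⟩

theorem mod_is_emod (a : Int) : PySem.Int.mod a pvMOD = a % pvMOD :=
  PySem.Int.mod_eq_emod_of_pos (by norm_num [pvMOD])

-- fast doubling computes the Fibonacci pair mod pvMOD
theorem fibPair_eq (k : Nat) :
    fibPair k = ((Nat.fib k : Int) % pvMOD, (Nat.fib (k + 1) : Int) % pvMOD) := by
  induction k using Nat.strong_induction_on with
  | _ k ih =>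
    match k with
    | 0 => norm_num [fibPair, Nat.fib]; decide
    | (j + 1) =>
      have hm := ih ((j + 1) / 2) (Nat.div_lt_self (Nat.succ_pos j) one_lt_two)
      simp only [fibPair, hm, mod_is_emod]
      set m := (j + 1) / 2 with hmdef
      have ha : ((Nat.fib m : Int) % pvMOD) ≡ (Nat.fib m : Int) [ZMOD pvMOD] :=
        Int.emod_emod_of_dvd _ dvd_rfl
      have hb : ((Nat.fib (m + 1) : Int) % pvMOD) ≡ (Nat.fib (m + 1) : Int) [ZMOD pvMOD] :=
        Int.emod_emod_of_dvd _ dvd_rfl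
      have hle : Nat.fib m ≤ 2 * Nat.fib (m + 1) :=
        le_trans Nat.fib_le_fib_succ (by omega)
      have hfib2m : ((Nat.fib (2 * m) : Int)) =
          (Nat.fib m : Int) * (2 * (Nat.fib (m + 1) : Int) - (Nat.fib m : Int)) := by
        rw [Nat.fib_two_mul]; push_cast [hle]; ring
      have hfib2m1 : ((Nat.fib (2 * m + 1) : Int)) =
          (Nat.fib (m + 1) : Int) * (Nat.fib (m + 1) : Int) +
            (Nat.fib m : Int) * (Nat.fib m : Int) := by
        rw [Nat.fib_two_mul_add_one]; push_cast; ring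
      have hc : ((Nat.fib m : Int) % pvMOD) *
            (2 * ((Nat.fib (m + 1) : Int) % pvMOD) - (Nat.fib m : Int) % pvMOD)
            ≡ (Nat.fib (2 * m) : Int) [ZMOD pvMOD] := by
        calc ((Nat.fib m : Int) % pvMOD) *
              (2 * ((Nat.fib (m + 1) : Int) % pvMOD) - (Nat.fib m : Int) % pvMOD)
            ≡ (Nat.fib m : Int) * (2 * (Nat.fib (m + 1) : Int) - (Nat.fib m : Int))
              [ZMOD pvMOD] := ha.mul (((Int.ModEq.refl 2).mul hb).sub ha)
          _ = (Nat.fib (2 * m) : Int) := hfib2m.symm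
      have hd : ((Nat.fib m : Int) % pvMOD) * ((Nat.fib m : Int) % pvMOD) +
            ((Nat.fib (m + 1) : Int) % pvMOD) * ((Nat.fib (m + 1) : Int) % pvMOD)
            ≡ (Nat.fib (2 * m + 1) : Int) [ZMOD pvMOD] := by
        calc ((Nat.fib m : Int) % pvMOD) * ((Nat.fib m : Int) % pvMOD) +
              ((Nat.fib (m + 1) : Int) % pvMOD) * ((Nat.fib (m + 1) : Int) % pvMOD)
            ≡ (Nat.fib m : Int) * (Nat.fib m : Int) +
              (Nat.fib (m + 1) : Int) * (Nat.fib (m + 1) : Int) [ZMOD pvMOD] :=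
              (ha.mul ha).add (hb.mul hb)
          _ = (Nat.fib (2 * m + 1) : Int) := by rw [hfib2m1]; ring
      have hfibsucc : (Nat.fib (2 * m + 2) : Int) =
          (Nat.fib (2 * m) : Int) + (Nat.fib (2 * m + 1) : Int) := by
        rw [show 2 * m + 2 = (2 * m) + 2 by ring, Nat.fib_add_two]; push_cast; ring
      split_ifs with hpar
      · -- j + 1 = 2 * m + 1
        have hj : j + 1 = 2 * m + 1 := by omega
        rw [hj]
        simp only [Prod.mk.injEq]
        constructor
        · exact hd
        · have hc' : ((Nat.fib m : Int) % pvMOD) *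
                (2 * ((Nat.fib (m + 1) : Int) % pvMOD) - (Nat.fib m : Int) % pvMOD) % pvMOD
                = (Nat.fib (2 * m) : Int) % pvMOD := hc
          have hd' : (((Nat.fib m : Int) % pvMOD) * ((Nat.fib m : Int) % pvMOD) +
                ((Nat.fib (m + 1) : Int) % pvMOD) * ((Nat.fib (m + 1) : Int) % pvMOD)) % pvMOD
                = (Nat.fib (2 * m + 1) : Int) % pvMOD := hd
          calc (((Nat.fib m : Int) % pvMOD) *
                  (2 * ((Nat.fib (m + 1) : Int) % pvMOD) - (Nat.fib m : Int) % pvMOD) % pvMOD +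
                (((Nat.fib m : Int) % pvMOD) * ((Nat.fib m : Int) % pvMOD) +
                  ((Nat.fib (m + 1) : Int) % pvMOD) * ((Nat.fib (m + 1) : Int) % pvMOD)) % pvMOD)
                % pvMOD
              = ((Nat.fib (2 * m) : Int) % pvMOD + (Nat.fib (2 * m + 1) : Int) % pvMOD)
                % pvMOD := by rw [hc', hd']
            _ = ((Nat.fib (2 * m) : Int) + (Nat.fib (2 * m + 1) : Int)) % pvMOD :=
                (Int.add_emod _ _ _).symm
            _ = (Nat.fib (2 * m + 1 + 1) : Int) % pvMOD := by
                rw [show 2 * m + 1 + 1 = 2 * m + 2 by ring, hfibsucc]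
      · -- j + 1 = 2 * m
        have hj : j + 1 = 2 * m := by omega
        rw [hj]
        simp only [Prod.mk.injEq]
        exact ⟨hc, hd⟩

theorem main_ge3 (n : Int) (h : 3 ≤ n) : countHousePlacements n = countHousePlacements_alt n := by
  unfold countHousePlacements countHousePlacements_alt
  rw [if_neg (by omega), if_neg (by omega), if_neg (by omega)]
  have hlen : (PySem.List.pyRange 0 (n - 2) 1).length = (n - 2).toNat := by
    rw [PySem.List.length_pyRange_one]; omega
  obtain ⟨m, hm⟩ : ∃ m, (n - 2).toNat = m + 1 := ⟨(n - 2).toNat - 1, by omega⟩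
  rw [foldl_const_step, hlen, hm, iter_step]
  have hk : (n + 2).toNat = m + 5 := by omega
  rw [hk, fibPair_eq, show ((10 : Int) ^ 9 + 7) = pvMOD from rfl]
  simp only [mod_is_emod]
  exact Int.mul_emod _ _ _

theorem small_case (n : Int) (h1 : 1 ≤ n) (h2 : n < 3) :
    countHousePlacements n = countHousePlacements_alt n := by
  interval_cases n
  · show countHousePlacements 1 = countHousePlacements_alt 1
    unfold countHousePlacements countHousePlacements_alt
    rw [if_pos rfl, if_neg (by omega)]
    rw [show ((1 : Int) + 2).toNat = 3 by rfl, fibPair_eq]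
    norm_num [Nat.fib, mod_is_emod, pvMOD]
  · show countHousePlacements 2 = countHousePlacements_alt 2
    unfold countHousePlacements countHousePlacements_alt
    rw [if_neg (by omega), if_pos rfl, if_neg (by omega)]
    rw [show ((2 : Int) + 2).toNat = 4 by rfl, fibPair_eq]
    norm_num [Nat.fib, mod_is_emod, pvMOD]

-- ===== VERDICT (by name: the statement is the Claim_ definition above) =====
theorem countHousePlacements_spec : Claim_equal_countHousePlacements := by
  intro n _ hpre
  unfold Spec_countHousePlacements
  unfold Pre_countHousePlacements at hpre
  rcases lt_or_ge n 3 with h3 | h3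
  · exact small_case n hpre h3
  · exact main_ge3 n h3
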